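-- pv_equiv track=rewrite | github.com/PeterGemmell/Yahoo_Finance_Stock_Screener | emailStocks.py | sort_today
-- ===== SOURCE A (Python) =====
-- def sort_today(stocks):
--         print ('Sorting todays stocks...')
--         sorted = []
--         for stock in stocks:
--                 if stock[4] == 'After Market Close':
--                         sorted.append(stock)
--         for stock in stocks:
--                 if stock[4] == 'Time Not Supplied':
--                         sorted.append(stock)
--         return sorted
-- ===== SOURCE B (Python) =====
-- def sort_today(stocks):
--         print ('Sorting todays stocks...')
--         amc = []
--         tns = []
--         for stock in stocks:
--                 if stock[4] == 'After Market Close':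
--                         amc.append(stock)
--                 elif stock[4] == 'Time Not Supplied':
--                         tns.append(stock)
--         return amc + tns
-- ===== Notes on version B (the rewrite author's own statement) =====
-- stated objective: alternative
-- what changed: A's two full scans over stocks (one per category) are replaced by a single pass that maintains two ordered buckets (amc, tns) and concatenates them at the end.
import Mathlib
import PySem

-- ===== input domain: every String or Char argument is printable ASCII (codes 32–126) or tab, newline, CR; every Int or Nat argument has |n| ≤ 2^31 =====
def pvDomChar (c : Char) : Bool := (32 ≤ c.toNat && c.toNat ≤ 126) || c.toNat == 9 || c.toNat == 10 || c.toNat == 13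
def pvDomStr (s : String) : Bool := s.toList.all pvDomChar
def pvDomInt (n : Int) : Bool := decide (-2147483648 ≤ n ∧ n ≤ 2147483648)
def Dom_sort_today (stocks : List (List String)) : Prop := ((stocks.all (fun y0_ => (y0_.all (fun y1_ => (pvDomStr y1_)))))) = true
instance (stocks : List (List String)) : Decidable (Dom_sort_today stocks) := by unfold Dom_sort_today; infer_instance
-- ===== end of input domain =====

-- B fuses A's two scans into one pass that keeps two ordered buckets and concatenates them; return value only (the print is I/O).
-- ===== PORT A =====
def sort_today (stocks : List (List String)) : List (List String) :=
  -- print('Sorting todays stocks...') is I/O only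
  let sorted1 := stocks.foldl (fun acc stock =>
    if PySem.List.pyGet? stock 4 = some "After Market Close" then acc ++ [stock] else acc) []
  stocks.foldl (fun acc stock =>
    if PySem.List.pyGet? stock 4 = some "Time Not Supplied" then acc ++ [stock] else acc) sorted1

-- ===== PORT B =====
def sort_today_alt (stocks : List (List String)) : List (List String) :=
  let p := stocks.foldl (fun (p : List (List String) × List (List String)) stock =>
    if PySem.List.pyGet? stock 4 = some "After Market Close" then (p.1 ++ [stock], p.2)
    else if PySem.List.pyGet? stock 4 = some "Time Not Supplied" then (p.1, p.2 ++ [stock])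
    else p) ([], [])
  p.1 ++ p.2

-- ===== PRECONDITION & SPEC =====
-- A evaluates stock[4] for every stock: Pre_ excludes rows shorter than 5 entries, on which Python A raises IndexError.
def Pre_sort_today (stocks : List (List String)) : Prop := ∀ stock ∈ stocks, 5 ≤ stock.length
instance (stocks : List (List String)) : Decidable (Pre_sort_today stocks) := by unfold Pre_sort_today; infer_instance
def pvWitness_sort_today : List (List String) :=
  [["A", "1", "2", "3", "After Market Close"], ["B", "1", "2", "3", "Time Not Supplied"], ["C", "1", "2", "3", "x"]]
def Spec_sort_today (stocks : List (List String)) (out : List (List String)) : Prop := out = sort_today_alt stocks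
instance (stocks : List (List String)) (out : List (List String)) : Decidable (Spec_sort_today stocks out) := by unfold Spec_sort_today; infer_instance

-- ===== CLAIM (what is proved, stated in full; the proofs are below) =====
def Claim_equal_sort_today : Prop := ∀ (stocks : List (List String)), Dom_sort_today stocks → Pre_sort_today stocks → Spec_sort_today stocks (sort_today stocks)

-- ===== LEMMAS AND PROOFS =====
theorem sort_today_alt_invariant (stocks : List (List String)) (a t : List (List String)) :
    (stocks.foldl (fun (p : List (List String) × List (List String)) stock =>
      if PySem.List.pyGet? stock 4 = some "After Market Close" then (p.1 ++ [stock], p.2)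
      else if PySem.List.pyGet? stock 4 = some "Time Not Supplied" then (p.1, p.2 ++ [stock])
      else p) (a, t)) =
    (a ++ stocks.filter (fun s => PySem.List.pyGet? s 4 = some "After Market Close"),
     t ++ stocks.filter (fun s => PySem.List.pyGet? s 4 = some "Time Not Supplied")) := by
  induction stocks generalizing a t with
  | nil => simp
  | cons hd tl ih =>
    simp only [List.foldl_cons, List.filter_cons]
    by_cases h1 : PySem.List.pyGet? hd 4 = some "After Market Close"
    · have h2 : ¬ PySem.List.pyGet? hd 4 = some "Time Not Supplied" := by
        rw [h1]; simp
      simp [h1, ih]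
    · by_cases h2 : PySem.List.pyGet? hd 4 = some "Time Not Supplied"
      · simp [h2, ih]
      · simp [h1, h2, ih]

-- ===== VERDICT (by name: the statement is the Claim_ definition above) =====
theorem sort_today_spec : Claim_equal_sort_today := by
  intro stocks _ _
  show sort_today stocks = sort_today_alt stocks
  simp only [sort_today, sort_today_alt]
  rw [sort_today_alt_invariant]
  rw [PySem.List.foldl_append_ite_eq_filter, PySem.List.foldl_append_ite_eq_filter]
  simp
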